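-- pv_equiv track=rewrite | github.com/yasasi-abeysinghe/ETDTitlePageClassifier | Rule-based-model/heuristic_classifier.py | refactor_page_labels
-- ===== SOURCE A (Python) =====
-- def refactor_page_labels(page_labels):
--     i = 0
--     flag = False
--     new_page_label_list = []
--     for page in page_labels:
--         page_label = page[1]
--         if i < 3:
--             new_page_label_list.append(page)
--             if page_label == "title-page":
--                 flag = True
--         elif not flag:
--             new_page_label_list.append(page)
--             if page_label == "title-page":
--                 break
--         i += 1
--     return new_page_label_list
-- ===== SOURCE B (Python) =====
-- def refactor_page_labels(page_labels):
--     t = next((k for k, p in enumerate(page_labels) if p[1] == "title-page"), None)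
--     if t is None:
--         end = len(page_labels)
--     elif t < 3:
--         end = 3
--     else:
--         end = t + 1
--     return page_labels[:end]
-- ===== Notes on version B (the rewrite author's own statement) =====
-- stated objective: simpler
-- what changed: Instead of building the result incrementally with an index counter and a flag, B computes a single cutoff index from the position of the first title-page (len if none, 3 if it is in the first three pages, else that position + 1) and returns one slice page_labels[:end].
import Mathlib
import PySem

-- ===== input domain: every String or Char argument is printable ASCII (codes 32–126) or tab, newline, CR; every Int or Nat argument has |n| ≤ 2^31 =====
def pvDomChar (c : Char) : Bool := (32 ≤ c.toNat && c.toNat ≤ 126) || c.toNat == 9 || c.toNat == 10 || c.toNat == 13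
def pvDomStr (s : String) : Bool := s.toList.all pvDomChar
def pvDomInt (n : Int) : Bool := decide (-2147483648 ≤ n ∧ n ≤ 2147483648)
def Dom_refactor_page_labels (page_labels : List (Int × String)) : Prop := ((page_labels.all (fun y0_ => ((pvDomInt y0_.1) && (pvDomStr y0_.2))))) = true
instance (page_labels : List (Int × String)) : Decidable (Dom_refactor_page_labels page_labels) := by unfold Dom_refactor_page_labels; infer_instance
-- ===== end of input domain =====

-- B replaces A's incremental counter-and-flag loop by computing one cutoff index
-- from the position of the first title-page and returning a single slice (objective: simpler).

-- ===== PORT A =====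
-- loop state: i, flag, accumulated list; 'break' returns the accumulator immediately
def refactorA_loop : List (Int × String) → Int → Bool → List (Int × String) → List (Int × String)
  | [], _, _, acc => acc
  | p :: rest, i, flag, acc =>
    if i < 3 then
      refactorA_loop rest (i + 1) (flag || (p.2 == "title-page")) (acc ++ [p])
    else if !flag then
      if p.2 == "title-page" then acc ++ [p]
      else refactorA_loop rest (i + 1) flag (acc ++ [p])
    else refactorA_loop rest (i + 1) flag acc

def refactor_page_labels (page_labels : List (Int × String)) : List (Int × String) :=
  refactorA_loop page_labels 0 false []

-- ===== PORT B =====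
-- t = index of the first title-page (next(...) over enumerate → List.findIdx?);
-- end = len if none, 3 if t < 3, else t + 1; return the slice page_labels[:end]
def refactor_page_labels_alt (page_labels : List (Int × String)) : List (Int × String) :=
  let t := page_labels.findIdx? (fun p => p.2 == "title-page")
  let e : Int :=
    match t with
    | none => (page_labels.length : Int)
    | some k => if (k : Int) < 3 then 3 else (k : Int) + 1
  PySem.List.slice page_labels none (some e)

-- ===== PRECONDITION & SPEC =====
def Spec_refactor_page_labels (page_labels : List (Int × String)) (out : List (Int × String)) : Prop := out = refactor_page_labels_alt page_labels
instance (page_labels : List (Int × String)) (out : List (Int × String)) : Decidable (Spec_refactor_page_labels page_labels out) := by unfold Spec_refactor_page_labels; infer_instance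

-- ===== CLAIM (what is proved, stated in full; the proofs are below) =====
def Claim_equal_refactor_page_labels : Prop := ∀ (page_labels : List (Int × String)), Dom_refactor_page_labels page_labels → Spec_refactor_page_labels page_labels (refactor_page_labels page_labels)

-- ===== LEMMAS AND PROOFS =====

-- once flag is set and i ≥ 3, A's loop appends nothing more
theorem refactorA_loop_flagged (l : List (Int × String)) (i : Int) (hi : 3 ≤ i)
    (acc : List (Int × String)) : refactorA_loop l i true acc = acc := by
  induction l generalizing i acc with
  | nil => rfl
  | cons p rest ih =>
    simp only [refactorA_loop]
    rw [if_neg (by omega)]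
    simp only [Bool.not_true, if_neg (by decide : ¬((false : Bool) = true))]
    exact ih (i + 1) (by omega) acc

-- with the flag clear and i ≥ 3, A's loop appends the tail up to and including
-- the first title-page, i.e. take (j+1) at the first matching index j
theorem refactorA_loop_unflagged (l : List (Int × String)) (i : Int) (hi : 3 ≤ i)
    (acc : List (Int × String)) :
    refactorA_loop l i false acc =
      acc ++ (match l.findIdx? (fun p => p.2 == "title-page") with
              | none => l
              | some j => l.take (j + 1)) := by
  induction l generalizing i acc with
  | nil => simp [refactorA_loop]
  | cons p rest ih =>
    simp only [refactorA_loop, List.findIdx?_cons]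
    rw [if_neg (by omega)]
    simp only [Bool.not_false]
    simp only [if_true]
    by_cases h : p.2 == "title-page"
    · simp [h]
    · rw [if_neg h, ih (i + 1) (by omega)]
      cases hf : rest.findIdx? (fun p => p.2 == "title-page") <;>
        simp [h, List.take_succ_cons]

-- a python slice xs[:e] with a nonnegative int bound is a take
theorem slice_to_toNat (xs : List (Int × String)) (e : Int) (he : 0 ≤ e) :
    PySem.List.slice xs none (some e) = xs.take e.toNat := by
  have h := PySem.List.slice_to_natCast xs e.toNat
  rw [show ((e.toNat : Nat) : Int) = e by omega] at h
  exact h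

theorem refactor_page_labels_spec' (page_labels : List (Int × String)) :
    refactor_page_labels page_labels = refactor_page_labels_alt page_labels := by
  match page_labels with
  | [] => rfl
  | [a] =>
    by_cases ha : a.2 == "title-page" <;>
      simp [refactor_page_labels, refactor_page_labels_alt, refactorA_loop,
        List.findIdx?_cons, ha] <;>
      rw [slice_to_toNat _ _ (by omega)] <;> simp
  | [a, b] =>
    by_cases ha : a.2 == "title-page" <;> by_cases hb : b.2 == "title-page" <;>
      simp [refactor_page_labels, refactor_page_labels_alt, refactorA_loop,
        List.findIdx?_cons, ha, hb] <;>
      rw [slice_to_toNat _ _ (by omega)] <;> simp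
  | a :: b :: c :: rest =>
    simp only [refactor_page_labels, refactor_page_labels_alt, refactorA_loop,
      List.findIdx?_cons]
    norm_num
    by_cases ha : a.2 = "title-page" <;> by_cases hb : b.2 = "title-page" <;>
      by_cases hc : c.2 = "title-page"
    all_goals first
      -- at least one of the first three pages is a title-page: A stops adding, B takes 3
      | (simp only [ha, hb, hc, beq_iff_eq, beq_self_eq_true, if_true, ite_true, ite_false,
           Option.map_some, Option.map_none, Bool.or_true, Bool.true_or, Bool.false_or,
           show ∀ s : String, ¬ s = "title-page" → (s == "title-page") = false from
             fun s h => beq_eq_false_iff_ne.mpr h]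
         rw [refactorA_loop_flagged _ 3 (by omega)]
         first
           | (rw [slice_to_toNat _ _ (by omega)]; simp)
           | (split <;> rw [slice_to_toNat _ _ (by omega)] <;> simp))
      -- none of the first three is a title-page: A scans the tail, B takes up to the first hit
      | (simp only [ha, hb, hc, ite_false, Option.map_some, Option.map_none,
           Bool.or_false, Bool.false_or, if_neg ha, if_neg hb, if_neg hc,
           show (a.2 == "title-page") = false from beq_eq_false_iff_ne.mpr ha,
           show (b.2 == "title-page") = false from beq_eq_false_iff_ne.mpr hb,
           show (c.2 == "title-page") = false from beq_eq_false_iff_ne.mpr hc]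
         rw [refactorA_loop_unflagged _ 3 (by omega)]
         cases hf : rest.findIdx? (fun p => p.2 == "title-page") with
         | none =>
           simp only [Option.map_none]
           rw [slice_to_toNat _ _ (by omega)]
           simp
         | some j =>
           simp only [Option.map_some]
           rw [if_neg (by push_cast; omega), slice_to_toNat _ _ (by push_cast; omega)]
           rw [show ((((j + 1 + 1 + 1 : Nat) : Int)) + 1).toNat = 3 + (j + 1) by omega]
           simp [List.take_succ_cons, Nat.add_comm 3 (j + 1)])

-- ===== VERDICT (by name: the statement is the Claim_ definition above) =====
theorem refactor_page_labels_spec : Claim_equal_refactor_page_labels := by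
  intro page_labels _
  exact refactor_page_labels_spec' page_labels
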